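-- pv_equiv track=rewrite | github.com/ictcubeMENA/Training_one | codewars/4kyu/Square into Squares. Protect trees!/main.py | decompose
-- ===== SOURCE A (Python) =====
-- def decompose(n):
--     r = 0
--     res = [n]
--     while res:
--         c = res.pop()
--         r += c*c
--         for j in range(c-1,0,-1):
--             if r - j*j >= 0:
--                 r = r-j*j
--                 res.append(j)
--                 if r == 0:
--                     res.sort()
--                     return res
--
--     return None
-- ===== SOURCE B (Python) =====
-- def _rec(rem, mx):
--     # largest-first search: pick i (i*i <= rem), recurse on the remainder with parts < i
--     for i in range(mx, 0, -1):
--         if i * i <= rem: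
--             if rem == i * i:
--                 return [i]
--             sub = _rec(rem - i * i, i - 1)
--             if sub is not None:
--                 return [i] + sub
--     return None
--
-- def decompose(n):
--     res = _rec(n * n, n - 1)
--     return sorted(res) if res is not None else None
-- ===== Notes on version B (the rewrite author's own statement) =====
-- stated objective: alternative
-- what changed: Replaces A's explicit-stack while-loop (pop, restore the remainder, greedy inner for-loop pushing parts) by a direct recursive largest-first search rec(rem, mx) that returns the descending decomposition and sorts it once; no mutable stack or running remainder is maintained.
import Mathlib
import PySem

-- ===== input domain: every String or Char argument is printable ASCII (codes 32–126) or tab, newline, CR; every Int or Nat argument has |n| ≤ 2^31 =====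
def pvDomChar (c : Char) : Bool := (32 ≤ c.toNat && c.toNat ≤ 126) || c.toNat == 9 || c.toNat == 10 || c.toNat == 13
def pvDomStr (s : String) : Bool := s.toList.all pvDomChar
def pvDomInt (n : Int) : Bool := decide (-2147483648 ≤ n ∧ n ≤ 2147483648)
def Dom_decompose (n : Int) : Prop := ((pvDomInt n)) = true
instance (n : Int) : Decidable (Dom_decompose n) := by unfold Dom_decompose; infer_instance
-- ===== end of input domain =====

-- B replaces A's explicit stack + backtracking while-loop by a direct largest-first
-- recursive search (objective: alternative decomposition, same results).

-- ===== PORT A =====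
-- A's inner `for j in range(c-1,0,-1)` loop: returns .inl answer (Python's `res.sort(); return res`)
-- or .inr (r, res) when the for-loop ends and the while-loop continues.
def pvInner (r j : Int) (res : List Int) : (List Int) ⊕ (Int × List Int) :=
  if 0 < j then
    if 0 ≤ r - j * j then
      if r - j * j = 0 then Sum.inl (PySem.List.sorted (res ++ [j]) (fun x => x) false)
      else pvInner (r - j * j) (j - 1) (res ++ [j])
    else pvInner r (j - 1) res
  else Sum.inr (r, res)
termination_by j.toNat
decreasing_by all_goals omega

-- A's `while res:` loop: pop from the end, add c*c back, run the inner for-loop.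
-- `fuel` is only a totality guard (one unit per while-iteration); decompose_spec below
-- proves the fuel passed by `decompose` is never exhausted.
def pvLoop (fuel : Nat) (r : Int) (res : List Int) : Option (List Int) :=
  match fuel with
  | 0 => none
  | fuel + 1 =>
    match res.getLast? with
    | none => none
    | some c =>
      match pvInner (r + c * c) (c - 1) res.dropLast with
      | Sum.inl ans => some ans
      | Sum.inr p => pvLoop fuel p.1 p.2

def decompose (n : Int) : Option (List Int) := pvLoop (3 ^ (n.toNat + 1) + 1) 0 [n]

-- ===== PORT B =====
-- Source B's `_rec(rem, mx)`: the for-loop over i = mx..1 and the recursive sub-call both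
-- continue at i-1, so the loop and the recursion are one recursion on i.
def pvRec (rem i : Int) : Option (List Int) :=
  if 0 < i then
    if i * i ≤ rem then
      if rem = i * i then some [i]
      else
        match pvRec (rem - i * i) (i - 1) with
        | some sub => some (i :: sub)
        | none => pvRec rem (i - 1)
    else pvRec rem (i - 1)
  else none
termination_by i.toNat
decreasing_by all_goals omega

def decompose_alt (n : Int) : Option (List Int) :=
  match pvRec (n * n) (n - 1) with
  | some res => some (PySem.List.sorted res (fun x => x) false)
  | none => none

-- ===== PRECONDITION & SPEC =====
def Spec_decompose (n : Int) (out : Option (List Int)) : Prop := out = decompose_alt n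
instance (n : Int) (out : Option (List Int)) : Decidable (Spec_decompose n out) := by unfold Spec_decompose; infer_instance

-- ===== CLAIM (what is proved, stated in full; the proofs are below) =====
def Claim_equal_decompose : Prop := ∀ (n : Int), Dom_decompose n → Spec_decompose n (decompose n)

-- ===== LEMMAS AND PROOFS =====

-- weight of A's stack: it strictly bounds the number of remaining while-iterations
def pvWsum (l : List Int) : Nat := (l.map (fun c => 3 ^ c.toNat + 2)).sum

-- what A's while-loop computes, said in B's terms: pop c, search pvRec below c,
-- on success sort the stack rest plus the found parts, on failure keep popping.
-- (stk is A's stack top-first, i.e. reversed)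
def pvGfix (r : Int) (stk : List Int) : Option (List Int) :=
  match stk with
  | [] => none
  | c :: tail =>
    match pvRec (r + c * c) (c - 1) with
    | some sub => some (PySem.List.sorted (tail.reverse ++ sub) (fun x => x) false)
    | none => pvGfix (r + c * c) tail

def pvGfixL (r : Int) (res : List Int) : Option (List Int) := pvGfix r res.reverse

lemma pvInner_stop (r j : Int) (res : List Int) (h : ¬ 0 < j) :
    pvInner r j res = Sum.inr (r, res) := by
  rw [pvInner, if_neg h]

lemma pvInner_hit (r j : Int) (res : List Int) (h1 : 0 < j) (h2 : 0 ≤ r - j * j)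
    (h3 : r - j * j = 0) :
    pvInner r j res = Sum.inl (PySem.List.sorted (res ++ [j]) (fun x => x) false) := by
  rw [pvInner, if_pos h1, if_pos h2, if_pos h3]

lemma pvInner_push (r j : Int) (res : List Int) (h1 : 0 < j) (h2 : 0 ≤ r - j * j)
    (h3 : ¬ r - j * j = 0) :
    pvInner r j res = pvInner (r - j * j) (j - 1) (res ++ [j]) := by
  rw [pvInner, if_pos h1, if_pos h2, if_neg h3]

lemma pvInner_skip (r j : Int) (res : List Int) (h1 : 0 < j) (h2 : ¬ 0 ≤ r - j * j) :
    pvInner r j res = pvInner r (j - 1) res := by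
  rw [pvInner, if_pos h1, if_neg h2]

lemma pvRec_stop (rem i : Int) (h : ¬ 0 < i) : pvRec rem i = none := by
  rw [pvRec, if_neg h]

lemma pvRec_hit (rem i : Int) (h1 : 0 < i) (h2 : i * i ≤ rem) (h3 : rem = i * i) :
    pvRec rem i = some [i] := by
  rw [pvRec, if_pos h1, if_pos h2, if_pos h3]

lemma pvRec_sub (rem i : Int) (h1 : 0 < i) (h2 : i * i ≤ rem) (h3 : ¬ rem = i * i) :
    pvRec rem i =
      (match pvRec (rem - i * i) (i - 1) with
       | some sub => some (i :: sub)
       | none => pvRec rem (i - 1)) := by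
  rw [pvRec, if_pos h1, if_pos h2, if_neg h3]

lemma pvRec_skip (rem i : Int) (h1 : 0 < i) (h2 : ¬ i * i ≤ rem) : pvRec rem i = pvRec rem (i - 1) := by
  rw [pvRec, if_pos h1, if_neg h2]

lemma pvWsum_append (a b : List Int) : pvWsum (a ++ b) = pvWsum a + pvWsum b := by
  simp [pvWsum]

lemma pvLoop_nil (fuel : Nat) (r : Int) : pvLoop fuel r [] = none := by
  cases fuel <;> rfl

lemma pvLoop_concat (fuel : Nat) (r c : Int) (rest : List Int) :
    pvLoop (fuel + 1) r (rest ++ [c]) =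
      (match pvInner (r + c * c) (c - 1) rest with
       | Sum.inl ans => some ans
       | Sum.inr p => pvLoop fuel p.1 p.2) := by
  rw [pvLoop, List.getLast?_concat, List.dropLast_concat]

lemma pvGfixL_nil (r : Int) : pvGfixL r [] = none := rfl

lemma pvGfixL_concat (r c : Int) (rest : List Int) :
    pvGfixL r (rest ++ [c]) =
      (match pvRec (r + c * c) (c - 1) with
       | some sub => some (PySem.List.sorted (rest ++ sub) (fun x => x) false)
       | none => pvGfixL (r + c * c) rest) := by
  unfold pvGfixL
  rw [List.reverse_append]
  simp [pvGfix]

-- the crucial correspondence, proved as one induction on the bound N: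
-- (Q) with enough fuel, A's loop computes pvGfixL;
-- (P) resuming A's loop after entering the inner for-loop at (r, j) computes exactly
--     B's search pvRec r j (with rest below on the stack), else keeps popping.
lemma pvStep (N : Nat) :
    (∀ (fuel : Nat) (r : Int) (res : List Int), pvWsum res + 1 ≤ N → N ≤ fuel →
      pvLoop fuel r res = pvGfixL r res) ∧
    (∀ (fuel : Nat) (r j : Int) (rest : List Int), pvWsum rest + 3 ^ (j.toNat + 1) ≤ N → N ≤ fuel →
      (match pvInner r j rest with
       | Sum.inl ans => some ans
       | Sum.inr p => pvLoop fuel p.1 p.2) =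
      (match pvRec r j with
       | some sub => some (PySem.List.sorted (rest ++ sub) (fun x => x) false)
       | none => pvGfixL r rest)) := by
  induction N with
  | zero => exact ⟨fun _ _ _ h => by omega, fun fuel r j rest h => by
      have : (1:Nat) ≤ 3 ^ (j.toNat + 1) := Nat.one_le_pow _ _ (by norm_num)
      omega⟩
  | succ N ih =>
    obtain ⟨_, ihP⟩ := ih
    have hQ : ∀ (fuel : Nat) (r : Int) (res : List Int), pvWsum res + 1 ≤ N + 1 → N + 1 ≤ fuel →
        pvLoop fuel r res = pvGfixL r res := by
      intro fuel r res h1 h2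
      rcases List.eq_nil_or_concat res with rfl | ⟨rest, c, rfl⟩
      · rw [pvLoop_nil, pvGfixL_nil]
      · obtain ⟨f, rfl⟩ : ∃ f, fuel = f + 1 := ⟨fuel - 1, by omega⟩
        rw [List.concat_eq_append] at h1 ⊢
        rw [pvLoop_concat, pvGfixL_concat]
        have hw : pvWsum (rest ++ [c]) = pvWsum rest + (3 ^ c.toNat + 2) := by
          rw [pvWsum_append]; simp [pvWsum]
        rw [hw] at h1
        refine ihP f (r + c * c) (c - 1) rest ?_ (by omega)
        by_cases hc : 1 ≤ c
        · have : (c - 1).toNat + 1 = c.toNat := by omega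
          rw [this]; omega
        · have h0 : (c - 1).toNat = 0 := by omega
          have h0' : c.toNat = 0 := by omega
          rw [h0]
          rw [h0'] at h1
          norm_num at h1 ⊢
          omega
    refine ⟨hQ, ?_⟩
    intro fuel r j rest hN hf
    have hone : (1:Nat) ≤ 3 ^ j.toNat := Nat.one_le_pow _ _ (by norm_num)
    have hpow : (3:Nat) ^ (j.toNat + 1) = 3 * 3 ^ j.toNat := by ring
    by_cases hj : 0 < j
    · have h3j : (3:Nat) ≤ 3 ^ j.toNat := by
        calc (3:Nat) = 3 ^ 1 := by norm_num
        _ ≤ 3 ^ j.toNat := Nat.pow_le_pow_right (by norm_num) (by omega)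
      have hjt : (j - 1).toNat + 1 = j.toNat := by omega
      have hNle : pvWsum rest + 3 ^ ((j - 1).toNat + 1) ≤ N := by rw [hjt]; omega
      by_cases hfit : 0 ≤ r - j * j
      · by_cases hz : r - j * j = 0
        · rw [pvInner_hit r j rest hj hfit hz, pvRec_hit r j hj (by omega) (by omega)]
        · rw [pvInner_push r j rest hj hfit hz, pvRec_sub r j hj (by omega) (by omega)]
          have hNle2 : pvWsum (rest ++ [j]) + 3 ^ ((j - 1).toNat + 1) ≤ N := by
            rw [hjt, pvWsum_append]
            have : pvWsum [j] = 3 ^ j.toNat + 2 := by simp [pvWsum]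
            omega
          rw [ihP fuel (r - j * j) (j - 1) (rest ++ [j]) hNle2 (by omega)]
          cases hsub : pvRec (r - j * j) (j - 1) with
          | some sub => simp [List.append_assoc]
          | none =>
            simp only
            have hQ2 : pvGfixL (r - j * j) (rest ++ [j]) =
                (match pvRec r (j - 1) with
                 | some sub => some (PySem.List.sorted (rest ++ sub) (fun x => x) false)
                 | none => pvGfixL r rest) := by
              rw [pvGfixL_concat]
              have hr : r - j * j + j * j = r := by ring
              rw [hr]
            rw [hQ2]
      · rw [pvInner_skip r j rest hj hfit, pvRec_skip r j hj (by omega)]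
        exact ihP fuel r (j - 1) rest hNle (by omega)
    · rw [pvInner_stop r j rest hj, pvRec_stop r j hj]
      exact hQ fuel r rest (by omega) hf

-- ===== VERDICT (by name: the statement is the Claim_ definition above) =====
theorem decompose_spec : Claim_equal_decompose := by
  intro n _
  unfold Spec_decompose decompose decompose_alt
  have hw : pvWsum [n] + 1 = 3 ^ n.toNat + 3 := by simp [pvWsum]
  have h3 : (3:Nat) ^ (n.toNat + 1) = 3 * 3 ^ n.toNat := by ring
  have hone : (1:Nat) ≤ 3 ^ n.toNat := Nat.one_le_pow _ _ (by norm_num)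
  rw [(pvStep (3 ^ (n.toNat + 1) + 1)).1 _ 0 [n] (by omega) le_rfl]
  rw [show ([n] : List Int) = [] ++ [n] from rfl, pvGfixL_concat, zero_add]
  cases pvRec (n * n) (n - 1) <;> simp [pvGfixL_nil]
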